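-- pv_equiv track=rewrite | github.com/vgcman16/OpenNXT | tools/run_947_userdump_doctor.py | select_latest_probe_events
-- ===== SOURCE A (Python) =====
-- from typing import Any
--
-- def select_latest_probe_events(events: list[dict[str, Any]]) -> dict[str, Any]:
--     interesting = ("caller-guard-skip", "state-repair-applied", "state-checkpoint", "fault-family-match")
--     latest: dict[str, Any] = {}
--     for action in interesting:
--         for event in reversed(events):
--             if event.get("action") == action:
--                 latest[action] = event
--                 break
--     return latest
-- ===== SOURCE B (Python) =====
-- def select_latest_probe_events(events):
--     interesting = ("caller-guard-skip", "state-repair-applied", "state-checkpoint", "fault-family-match")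
--     wanted = set(interesting)
--     latest = {}
--     for event in events:
--         action = event.get("action")
--         if action in wanted:
--             latest[action] = event
--     return {a: latest[a] for a in interesting if a in latest}
-- ===== Notes on version B (the rewrite author's own statement) =====
-- stated objective: simpler
-- what changed: Replaces four reverse scans (one per interesting action) with a single forward pass that overwrites latest[action] so the last occurrence wins, then emits the found actions in the declared order.
import Mathlib
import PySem

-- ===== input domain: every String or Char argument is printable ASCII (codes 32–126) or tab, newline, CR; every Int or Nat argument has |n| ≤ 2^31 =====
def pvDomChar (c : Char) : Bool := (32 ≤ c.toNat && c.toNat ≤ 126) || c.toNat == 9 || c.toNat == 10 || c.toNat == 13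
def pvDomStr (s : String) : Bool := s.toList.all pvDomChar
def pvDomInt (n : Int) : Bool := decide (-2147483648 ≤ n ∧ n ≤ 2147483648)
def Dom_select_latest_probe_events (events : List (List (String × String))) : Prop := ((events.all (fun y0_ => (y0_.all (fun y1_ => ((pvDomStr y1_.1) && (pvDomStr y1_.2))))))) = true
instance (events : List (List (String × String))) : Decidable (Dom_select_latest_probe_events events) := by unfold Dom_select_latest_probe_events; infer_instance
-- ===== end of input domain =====

-- B replaces A's four reverse scans by one forward pass with overwrite (last wins); objective: simpler.

-- ===== PORT A =====
-- the tuple `interesting` (shared literal)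
def pvInteresting : List String :=
  ["caller-guard-skip", "state-repair-applied", "state-checkpoint", "fault-family-match"]

-- A's inner loop: scan reversed(events), stop at the first event whose "action" is `action`
def pvScanRev (events : List (List (String × String))) (action : String) :
    Option (List (String × String)) :=
  events.reverse.find? (fun event => (PySem.Dict.mk event).get? "action" == some action)

def select_latest_probe_events (events : List (List (String × String))) :
    List (String × List (String × String)) :=
  (pvInteresting.foldl
    (fun (latest : PySem.Dict String (List (String × String))) action =>
      match pvScanRev events action with
      | some event => latest.insert action event
      | none => latest)
    PySem.Dict.empty).items

-- ===== PORT B =====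
def select_latest_probe_events_alt (events : List (List (String × String))) :
    List (String × List (String × String)) :=
  let wanted : PySem.Set String := PySem.Set.ofList pvInteresting
  let latest : PySem.Dict String (List (String × String)) :=
    events.foldl
      (fun latest event =>
        match (PySem.Dict.mk event).get? "action" with
        | some action => if PySem.Set.contains wanted action then latest.insert action event else latest
        | none => latest)
      PySem.Dict.empty
  pvInteresting.filterMap (fun a => (latest.get? a).map (fun event => (a, event)))

-- ===== PRECONDITION & SPEC =====
def Spec_select_latest_probe_events (events : List (List (String × String))) (out : List (String × List (String × String))) : Prop := out = select_latest_probe_events_alt events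
instance (events : List (List (String × String))) (out : List (String × List (String × String))) : Decidable (Spec_select_latest_probe_events events out) := by unfold Spec_select_latest_probe_events; infer_instance

-- ===== CLAIM (what is proved, stated in full; the proofs are below) =====
def Claim_equal_select_latest_probe_events : Prop := ∀ (events : List (List (String × String))), Dom_select_latest_probe_events events → Spec_select_latest_probe_events events (select_latest_probe_events events)

-- ===== LEMMAS AND PROOFS =====

-- B's dict lookup at an interesting action equals A's reverse scan (last writer wins)
theorem pvB_get (events : List (List (String × String)))
    (d : PySem.Dict String (List (String × String))) (a : String) (ha : a ∈ pvInteresting) :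
    (events.foldl
      (fun latest event =>
        match (PySem.Dict.mk event).get? "action" with
        | some action => if PySem.Set.contains (PySem.Set.ofList pvInteresting) action then latest.insert action event else latest
        | none => latest) d).get? a
    = match pvScanRev events a with
      | some event => some event
      | none => d.get? a := by
  induction events generalizing d with
  | nil => simp [pvScanRev]
  | cons e es ih =>
    have hrev : (e :: es).reverse = es.reverse ++ [e] := by simp
    simp only [List.foldl_cons, ih, pvScanRev, hrev, List.find?_append]
    cases hs : es.reverse.find? (fun event => (PySem.Dict.mk event).get? "action" == some a) with
    | some ev => simp
    | none =>
      cases hg : (PySem.Dict.mk e).get? "action" with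
      | none => simp [hg]
      | some b =>
        by_cases hb : b = a
        · subst hb
          simp [hg, ha, PySem.Dict.get?_insert_self]
        · by_cases hw : b ∈ pvInteresting
          · simp [hg, hb, hw, PySem.Dict.get?_insert, Ne.symm hb]
          · simp [hg, hb, hw]

-- A's insert-if-found fold over fresh distinct keys builds exactly the filterMap list
theorem pvA_items (f : String → Option (List (String × String))) :
    ∀ (ks : List String) (d : PySem.Dict String (List (String × String))),
      d.keys.Nodup → ks.Nodup → (∀ k ∈ ks, d.contains k = false) →
      (ks.foldl (fun latest a =>
          match f a with
          | some event => latest.insert a event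
          | none => latest) d).items
      = d.items ++ ks.filterMap (fun a => (f a).map (fun event => (a, event))) := by
  intro ks
  induction ks with
  | nil => intro d _ _ _; simp
  | cons k ks ih =>
    intro d hd hks hfresh
    have hk : d.contains k = false := hfresh k (List.mem_cons_self ..)
    cases hf : f k with
    | none =>
      simp only [List.foldl_cons, hf, List.filterMap_cons, Option.map_none]
      exact ih d hd (List.nodup_cons.1 hks).2 (fun k' hk' => hfresh k' (List.mem_cons_of_mem _ hk'))
    | some ev =>
      simp only [List.foldl_cons, hf, List.filterMap_cons, Option.map_some]
      rw [ih (d.insert k ev) (PySem.Dict.nodup_keys_insert d k ev hd) (List.nodup_cons.1 hks).2]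
      · rw [PySem.Dict.items_insert_of_not_contains d ev hk, List.append_assoc,
            List.singleton_append]
      · intro k' hk'
        have hne : k' ≠ k := by
          intro h; exact (List.nodup_cons.1 hks).1 (h ▸ hk')
        rw [PySem.Dict.contains_insert]
        simp [hne, hfresh k' (List.mem_cons_of_mem _ hk')]

-- ===== VERDICT (by name: the statement is the Claim_ definition above) =====
theorem select_latest_probe_events_spec : Claim_equal_select_latest_probe_events := by
  intro events _
  unfold Spec_select_latest_probe_events select_latest_probe_events select_latest_probe_events_alt
  rw [pvA_items (fun a => pvScanRev events a) pvInteresting PySem.Dict.empty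
      (by simp) (by decide) (by simp)]
  rw [show (PySem.Dict.empty : PySem.Dict String (List (String × String))).items = [] from rfl,
      List.nil_append]
  apply List.filterMap_congr
  intro a ha
  rw [pvB_get events PySem.Dict.empty a ha]
  cases pvScanRev events a <;> simp
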